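-- pv_equiv track=rewrite | github.com/Noetheon/vuln-prioritizer-workbench | src/vuln_prioritizer/cli_support/snapshot_rollup.py | finding_services
-- ===== SOURCE A (Python) =====
-- from typing import Any, cast
--
-- def finding_services(finding: dict[str, Any]) -> list[str]:
--     services = sorted(
--         {
--             occurrence.get("asset_business_service")
--             for occurrence in finding.get("provenance", {}).get("occurrences", [])
--             if occurrence.get("asset_business_service")
--         }
--     )
--     return services
-- ===== SOURCE B (Python) =====
-- def finding_services(finding):
--     out = []  # kept sorted and duplicate-free at all times
--     for occurrence in finding.get("provenance", {}).get("occurrences", []):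
--         v = occurrence.get("asset_business_service")
--         if not v:
--             continue
--         i = 0
--         while i < len(out) and out[i] < v:
--             i += 1
--         if i == len(out) or out[i] != v:
--             out.insert(i, v)
--     return out
-- ===== Notes on version B (the rewrite author's own statement) =====
-- stated objective: alternative
-- what changed: Replaces A's build-a-set-then-sort (set comprehension followed by sorted()) with an online insertion algorithm: a single pass over the occurrences that inserts each truthy service into its position in an accumulator kept sorted and duplicate-free, so no sort call and no set are used.
import Mathlib
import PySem

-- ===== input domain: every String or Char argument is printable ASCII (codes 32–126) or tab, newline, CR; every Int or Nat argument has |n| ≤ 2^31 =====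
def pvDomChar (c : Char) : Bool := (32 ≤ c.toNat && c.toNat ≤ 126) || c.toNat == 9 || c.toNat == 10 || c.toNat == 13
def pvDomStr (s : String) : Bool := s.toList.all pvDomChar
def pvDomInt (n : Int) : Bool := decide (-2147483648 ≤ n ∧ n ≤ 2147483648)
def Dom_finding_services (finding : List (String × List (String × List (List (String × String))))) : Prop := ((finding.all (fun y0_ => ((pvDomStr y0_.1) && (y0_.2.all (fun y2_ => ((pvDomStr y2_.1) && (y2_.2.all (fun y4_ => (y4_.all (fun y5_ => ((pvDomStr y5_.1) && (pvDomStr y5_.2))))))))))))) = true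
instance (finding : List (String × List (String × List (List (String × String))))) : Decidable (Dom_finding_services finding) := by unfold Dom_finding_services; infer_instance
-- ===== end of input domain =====

-- B inserts each truthy service into a sorted duplicate-free accumulator in one pass,
-- instead of A's set comprehension followed by sorted(); same return value.

-- ===== PORT A =====
-- set comprehension with truthiness filter ('occurrence.get(k)' truthy ↔ key present with a
-- nonempty value, modelled exactly as getD occ k "" ≠ ""), then sorted(…)
def finding_services (finding : List (String × List (String × List (List (String × String))))) : List String :=
  let occurrences := PySem.Dict.getD ⟨PySem.Dict.getD ⟨finding⟩ "provenance" []⟩ "occurrences" []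
  let services :=
    occurrences.foldl
      (fun s occurrence =>
        if PySem.Dict.getD (⟨occurrence⟩ : PySem.Dict String String) "asset_business_service" "" ≠ "" then
          PySem.Set.add s (PySem.Dict.getD (⟨occurrence⟩ : PySem.Dict String String) "asset_business_service" "")
        else s)
      PySem.Set.empty
  PySem.List.sorted services (fun x => x) false

-- ===== PORT B =====
-- B's inner while/insert: walk past elements < v, then insert v unless it is already there
def pvInsert (v : String) : List String → List String
  | [] => [v]
  | x :: t => if x < v then x :: pvInsert v t else if x ≠ v then v :: x :: t else x :: t

def finding_services_alt (finding : List (String × List (String × List (List (String × String))))) : List String :=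
  (PySem.Dict.getD ⟨PySem.Dict.getD ⟨finding⟩ "provenance" []⟩ "occurrences" []).foldl
    (fun out occurrence =>
      let v := PySem.Dict.getD (⟨occurrence⟩ : PySem.Dict String String) "asset_business_service" ""
      if v = "" then out else pvInsert v out)
    []

-- ===== PRECONDITION & SPEC =====
-- A is total on Python inputs; Pre_ only restricts the association-list encoding to lists that
-- actually represent Python dicts at the levels the function reads: neither "provenance" nor
-- "occurrences" nor "asset_business_service" is bound twice at its level (a Python dict cannot
-- bind a key twice), so every real Python input satisfies it.
def Pre_finding_services (finding : List (String × List (String × List (List (String × String))))) : Prop :=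
  (finding.map Prod.fst).count "provenance" ≤ 1 ∧
  ((PySem.Dict.getD ⟨finding⟩ "provenance" []).map Prod.fst).count "occurrences" ≤ 1 ∧
  ((PySem.Dict.getD ⟨PySem.Dict.getD ⟨finding⟩ "provenance" []⟩ "occurrences" []).all
    (fun occurrence => (occurrence.map Prod.fst).count "asset_business_service" ≤ 1)) = true
instance (finding : List (String × List (String × List (List (String × String))))) : Decidable (Pre_finding_services finding) := by unfold Pre_finding_services; infer_instance
def pvWitness_finding_services : (List (String × List (String × List (List (String × String))))) :=
  [("provenance", [("occurrences", [[("asset_business_service", "billing")], [("asset_business_service", "auth")]])])]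

def Spec_finding_services (finding : List (String × List (String × List (List (String × String))))) (out : List String) : Prop := out = finding_services_alt finding
instance (finding : List (String × List (String × List (List (String × String))))) (out : List String) : Decidable (Spec_finding_services finding out) := by unfold Spec_finding_services; infer_instance

-- ===== CLAIM =====
def Claim_equal_finding_services : Prop := ∀ (finding : List (String × List (String × List (List (String × String))))), Dom_finding_services finding → Pre_finding_services finding → Spec_finding_services finding (finding_services finding)

-- ===== LEMMAS AND PROOFS =====

theorem pv_mem_insert (v y : String) (l : List String) :
    y ∈ pvInsert v l ↔ y = v ∨ y ∈ l := by
  induction l with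
  | nil => simp [pvInsert]
  | cons x t ih =>
    simp only [pvInsert]
    split_ifs with h1 h2
    · simp [ih]; tauto
    · simp
    · have hx : x = v := not_not.mp h2
      subst hx; simp

theorem pv_pairwise_insert (v : String) (l : List String)
    (h : l.Pairwise (· < ·)) : (pvInsert v l).Pairwise (· < ·) := by
  induction l with
  | nil => simp [pvInsert]
  | cons x t ih =>
    rcases List.pairwise_cons.mp h with ⟨hx, ht⟩
    simp only [pvInsert]
    split_ifs with h1 h2
    · refine List.pairwise_cons.mpr ⟨?_, ih ht⟩
      intro y hy
      rcases (pv_mem_insert v y t).mp hy with rfl | hy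
      · exact h1
      · exact hx y hy
    · have hvx : v < x := lt_of_le_of_ne (not_lt.mp h1) (fun e => h2 e.symm)
      refine List.pairwise_cons.mpr ⟨?_, h⟩
      intro y hy
      rcases List.mem_cons.mp hy with rfl | hy
      · exact hvx
      · exact lt_trans hvx (hx y hy)
    · exact h

-- the value and condition extracted from one occurrence
def pvVal (occurrence : List (String × String)) : String :=
  PySem.Dict.getD (⟨occurrence⟩ : PySem.Dict String String) "asset_business_service" ""

theorem pv_foldB_pairwise (occs : List (List (String × String))) (out : List String)
    (h : out.Pairwise (· < ·)) :
    (occs.foldl (fun out occurrence =>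
        if pvVal occurrence = "" then out else pvInsert (pvVal occurrence) out) out).Pairwise (· < ·) := by
  induction occs generalizing out with
  | nil => exact h
  | cons o t ih =>
    rw [List.foldl_cons]
    split_ifs with h1
    · exact ih out h
    · exact ih _ (pv_pairwise_insert _ _ h)

theorem pv_foldB_mem (occs : List (List (String × String))) (out : List String) (y : String) :
    y ∈ occs.foldl (fun out occurrence =>
        if pvVal occurrence = "" then out else pvInsert (pvVal occurrence) out) out
      ↔ y ∈ out ∨ ∃ o ∈ occs, pvVal o ≠ "" ∧ pvVal o = y := by
  induction occs generalizing out with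
  | nil => simp
  | cons o t ih =>
    rw [List.foldl_cons]
    split_ifs with h1
    · rw [ih]; simp [h1]; try tauto
    · rw [ih, pv_mem_insert]; simp [h1]; try tauto

theorem pv_foldA_mem (occs : List (List (String × String))) (s : List String) (y : String) :
    y ∈ occs.foldl (fun s occurrence =>
        if pvVal occurrence ≠ "" then PySem.Set.add s (pvVal occurrence) else s) s
      ↔ y ∈ s ∨ ∃ o ∈ occs, pvVal o ≠ "" ∧ pvVal o = y := by
  induction occs generalizing s with
  | nil => simp
  | cons o t ih =>
    rw [List.foldl_cons]
    split_ifs with h1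
    · rw [ih, PySem.Set.mem_add]; simp [h1]; try tauto
    · rw [ih]; simp [h1]; try tauto

theorem pv_foldA_nodup (occs : List (List (String × String))) (s : List String)
    (h : s.Nodup) :
    (occs.foldl (fun s occurrence =>
        if pvVal occurrence ≠ "" then PySem.Set.add s (pvVal occurrence) else s) s).Nodup := by
  induction occs generalizing s with
  | nil => exact h
  | cons o t ih =>
    rw [List.foldl_cons]
    split_ifs with h1
    · exact ih _ (PySem.Set.nodup_add s (pvVal o) h)
    · exact ih s h

-- ===== VERDICT =====
theorem finding_services_spec : Claim_equal_finding_services := by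
  intro finding _ _
  show finding_services finding = finding_services_alt finding
  unfold finding_services finding_services_alt
  set occs := PySem.Dict.getD ⟨PySem.Dict.getD ⟨finding⟩ "provenance" []⟩ "occurrences" [] with hoccs
  simp only []
  have hB : ∀ (out : List String), (occs.foldl
      (fun out occurrence =>
        let v := PySem.Dict.getD (⟨occurrence⟩ : PySem.Dict String String) "asset_business_service" ""
        if v = "" then out else pvInsert v out) out)
      = occs.foldl (fun out occurrence =>
        if pvVal occurrence = "" then out else pvInsert (pvVal occurrence) out) out := by
    intro out; rfl
  have hA : (occs.foldl
      (fun s occurrence =>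
        if PySem.Dict.getD (⟨occurrence⟩ : PySem.Dict String String) "asset_business_service" "" ≠ "" then
          PySem.Set.add s (PySem.Dict.getD (⟨occurrence⟩ : PySem.Dict String String) "asset_business_service" "")
        else s) PySem.Set.empty)
      = occs.foldl (fun s occurrence =>
        if pvVal occurrence ≠ "" then PySem.Set.add s (pvVal occurrence) else s) PySem.Set.empty := rfl
  rw [hA, hB]
  apply PySem.List.sorted_eq_of_perm_of_pairwise_lt
  · have hnB : (occs.foldl (fun out occurrence =>
        if pvVal occurrence = "" then out else pvInsert (pvVal occurrence) out) []).Nodup :=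
      (pv_foldB_pairwise occs [] (by simp)).imp (fun h => ne_of_lt h)
    have hnA : (occs.foldl (fun s occurrence =>
        if pvVal occurrence ≠ "" then PySem.Set.add s (pvVal occurrence) else s) PySem.Set.empty).Nodup :=
      pv_foldA_nodup occs _ (by simp [PySem.Set.empty])
    rw [List.perm_ext_iff_of_nodup hnB hnA]
    intro a
    rw [pv_foldB_mem, pv_foldA_mem]
    simp [PySem.Set.empty]
  · exact pv_foldB_pairwise occs [] (by simp)
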